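-- pv_equiv track=rewrite | github.com/alexrudnick/nlp-doodles | classifier_util.py | split_training_test
-- ===== SOURCE A (Python) =====
-- def split_training_test(document_pairs):
--     """
--     Given a list of things, split them into training and test.
--     Returns a pair of lists: training, test.
--
--     Simplest split: every 10th thing is in the test set.
--     """
--     training = []
--     test = []
--     for i, pair in enumerate(document_pairs):
--         if i % 10 == 9:
--             test.append(pair)
--         else:
--             training.append(pair)
--     return training, test
-- ===== SOURCE B (Python) =====
-- def split_training_test(document_pairs):
--     """
--     Given a list of things, split them into training and test.
--     Returns a pair of lists: training, test.
--
--     Simplest split: every 10th thing is in the test set.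
--     """
--     training = []
--     test = []
--     for i in range(0, len(document_pairs), 10):
--         training += document_pairs[i:i+9]
--         test += document_pairs[i+9:i+10]
--     return training, test
-- ===== Notes on version B (the rewrite author's own statement) =====
-- stated objective: alternative
-- what changed: Replaced the per-element enumerate loop with an index-modulo branch by a loop over block starts 0,10,20,... that slices each block in one go (xs[i:i+9] to training, xs[i+9:i+10] to test); no per-element index or modulo test remains.
import Mathlib
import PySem

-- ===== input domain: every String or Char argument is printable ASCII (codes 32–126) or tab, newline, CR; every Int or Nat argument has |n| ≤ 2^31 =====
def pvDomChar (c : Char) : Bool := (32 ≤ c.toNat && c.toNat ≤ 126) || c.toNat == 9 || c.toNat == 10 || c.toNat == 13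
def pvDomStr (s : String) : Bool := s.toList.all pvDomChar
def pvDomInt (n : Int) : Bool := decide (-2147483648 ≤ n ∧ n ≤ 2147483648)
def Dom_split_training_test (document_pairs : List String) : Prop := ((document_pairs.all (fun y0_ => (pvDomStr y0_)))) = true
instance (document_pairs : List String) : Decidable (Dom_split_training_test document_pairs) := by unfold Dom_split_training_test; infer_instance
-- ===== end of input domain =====

-- B replaces A's per-element enumerate loop with an index-modulo branch by a loop over
-- block starts i = 0, 10, 20, … that slices each block (xs[i:i+9] to training,
-- xs[i+9:i+10] to test); objective: alternative.

-- ===== PORT A =====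
-- the for-loop over enumerate(document_pairs): i is the running index, tr/te the two accumulators
def splitGoA (i : Nat) (tr te : List String) : List String → List String × List String
  | [] => (tr, te)
  | x :: rest =>
      if i % 10 = 9 then splitGoA (i + 1) tr (te ++ [x]) rest
      else splitGoA (i + 1) (tr ++ [x]) te rest

def split_training_test (document_pairs : List String) : List String × List String :=
  splitGoA 0 [] [] document_pairs

-- ===== PORT B =====
-- the for-loop over range(0, len(document_pairs), 10): i is the block start,
-- xs[i:i+9] / xs[i+9:i+10] are Python slices (PySem.List.slice)
def splitGoB (xs tr te : List String) (i : Nat) : List String × List String :=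
  if _h : i < xs.length then
    splitGoB xs (tr ++ PySem.List.slice xs (some (i : Int)) (some ((i + 9 : Nat) : Int)))
                (te ++ PySem.List.slice xs (some ((i + 9 : Nat) : Int)) (some ((i + 10 : Nat) : Int)))
                (i + 10)
  else (tr, te)
termination_by xs.length - i

def split_training_test_alt (document_pairs : List String) : List String × List String :=
  splitGoB document_pairs [] [] 0

-- ===== PRECONDITION & SPEC =====
def Spec_split_training_test (document_pairs : List String) (out : List String × List String) : Prop := out = split_training_test_alt document_pairs
instance (document_pairs : List String) (out : List String × List String) : Decidable (Spec_split_training_test document_pairs out) := by unfold Spec_split_training_test; infer_instance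

-- ===== CLAIM (what is proved, stated in full; the proofs are below) =====
def Claim_equal_split_training_test : Prop := ∀ (document_pairs : List String), Dom_split_training_test document_pairs → Spec_split_training_test document_pairs (split_training_test document_pairs)

-- ===== LEMMAS AND PROOFS =====

-- one step of B's loop, with the slices rewritten as take/drop on the suffix from i
lemma goB_step (xs tr te : List String) (i : Nat) (h : i < xs.length) :
    splitGoB xs tr te i
      = splitGoB xs (tr ++ (xs.drop i).take 9) (te ++ ((xs.drop i).drop 9).take 1) (i + 10) := by
  rw [splitGoB, dif_pos h, PySem.List.slice_natCast, PySem.List.slice_natCast]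
  have h9 : i + 9 - i = 9 := by omega
  have h10 : i + 10 - (i + 9) = 1 := by omega
  rw [h9, h10, List.drop_drop]

-- ten steps of A's loop starting at a multiple of ten consume one block of ten
lemma goA_ten (q : Nat) (tr te : List String) (xs : List String) (h : xs ≠ []) :
    splitGoA (10 * q) tr te xs
      = splitGoA (10 * q + 10) (tr ++ xs.take 9) (te ++ (xs.drop 9).take 1) (xs.drop 10) := by
  rcases xs with _ | ⟨a1, _ | ⟨a2, _ | ⟨a3, _ | ⟨a4, _ | ⟨a5, _ | ⟨a6, _ | ⟨a7, _ | ⟨a8, _ | ⟨a9, _ | ⟨a10, rest⟩⟩⟩⟩⟩⟩⟩⟩⟩⟩ <;>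
    simp [splitGoA, Nat.add_assoc]

-- the two loops agree: A at absolute index 10*q on the suffix from 10*q, B at block start 10*q
lemma goAB (n : Nat) : ∀ (xs : List String) (q : Nat) (tr te : List String),
    xs.length - 10 * q ≤ n →
    splitGoA (10 * q) tr te (xs.drop (10 * q)) = splitGoB xs tr te (10 * q) := by
  induction n with
  | zero =>
      intro xs q tr te hlen
      have hge : xs.length ≤ 10 * q := by omega
      rw [splitGoB, dif_neg (by omega), List.drop_eq_nil_of_le hge]
      simp [splitGoA]
  | succ n ih =>
      intro xs q tr te hlen
      by_cases h : 10 * q < xs.length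
      · have hne : xs.drop (10 * q) ≠ [] := by
          simp [List.drop_eq_nil_iff]
          omega
        rw [goA_ten q tr te _ hne, goB_step xs tr te _ h]
        simp only [List.drop_drop]
        rw [show 10 * q + 10 = 10 * (q + 1) by ring]
        apply ih
        omega
      · have hge : xs.length ≤ 10 * q := by omega
        rw [splitGoB, dif_neg (by omega), List.drop_eq_nil_of_le hge]
        simp [splitGoA]

-- ===== VERDICT (by name: the statement is the Claim_ definition above) =====
theorem split_training_test_spec : Claim_equal_split_training_test := by
  intro xs _
  show split_training_test xs = split_training_test_alt xs
  have := goAB xs.length xs 0 [] [] (by omega)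
  simpa [split_training_test, split_training_test_alt] using this
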